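-- pv_equiv track=rewrite | github.com/dawsh2/ADMF-PC | src/core/coordinator/config/data_parser.py | _parse_data_string
-- ===== SOURCE A (Python) =====
-- from typing import Dict, Any, List, Union, Tuple, Optional
--
-- def _parse_data_string(data_str: str) -> List[Dict[str, str]]:
--     """
--     Parse a single data string like "SPY_5m" into components.
--
--     Returns:
--         List with single dict containing symbol, timeframe, and file
--     """
--     # Common timeframe patterns
--     timeframe_patterns = ['1m', '5m', '15m', '30m', '1h', '2h', '4h', '1d', 'daily']
--
--     # Try to extract symbol and timeframe
--     for tf in timeframe_patterns:
--         if data_str.endswith(f'_{tf}'):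
--             symbol = data_str[:-len(f'_{tf}')]
--             return [{
--                 'symbol': data_str,  # Use full string as symbol for direct file loading
--                 'timeframe': tf,
--                 'file': data_str,  # Original string is the file name
--                 'parsed_symbol': symbol,  # Store parsed symbol separately if needed
--                 'parsed_timeframe': tf
--             }]
--
--     # If no timeframe pattern found, treat the whole string as symbol
--     # This handles cases like "SPY" or custom naming
--     return [{
--         'symbol': data_str,
--         'timeframe': '1m',  # Default timeframe
--         'file': data_str
--     }]
-- ===== SOURCE B (Python) =====
-- _TIMEFRAMES = {'1m', '5m', '15m', '30m', '1h', '2h', '4h', '1d', 'daily'}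
--
-- def _parse_data_string(data_str: str):
--     prefix, sep, suffix = data_str.rpartition('_')
--     if sep and suffix in _TIMEFRAMES:
--         return [{
--             'symbol': data_str,
--             'timeframe': suffix,
--             'file': data_str,
--             'parsed_symbol': prefix,
--             'parsed_timeframe': suffix,
--         }]
--     return [{'symbol': data_str, 'timeframe': '1m', 'file': data_str}]
-- ===== Notes on version B (the rewrite author's own statement) =====
-- stated objective: idiomatic
-- what changed: Replaces A's loop over nine underscore-prefixed timeframe suffix patterns (each an endswith scan plus slicing) by a single rpartition at the last underscore followed by one set-membership test of the suffix.
import Mathlib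
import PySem

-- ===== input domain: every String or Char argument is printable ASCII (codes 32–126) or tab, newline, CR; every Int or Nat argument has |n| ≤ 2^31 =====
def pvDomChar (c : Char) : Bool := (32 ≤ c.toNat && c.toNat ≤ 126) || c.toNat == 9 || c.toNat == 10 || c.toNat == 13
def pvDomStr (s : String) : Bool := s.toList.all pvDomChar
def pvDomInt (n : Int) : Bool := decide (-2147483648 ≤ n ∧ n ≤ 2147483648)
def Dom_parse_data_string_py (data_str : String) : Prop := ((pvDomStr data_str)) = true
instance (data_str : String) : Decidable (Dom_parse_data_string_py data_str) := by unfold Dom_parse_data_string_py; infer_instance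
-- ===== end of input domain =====

-- B replaces A's loop over nine suffix patterns by a single rpartition at the last '_'
-- plus one set-membership test (objective: idiomatic one-shot parse).

-- ===== PORT A =====
def pvTfPatterns : List String := ["1m", "5m", "15m", "30m", "1h", "2h", "4h", "1d", "daily"]

def pvLoopA (data_str : String) : List String → List (List (String × String))
  | [] => [[("symbol", data_str), ("timeframe", "1m"), ("file", data_str)]]
  | tf :: rest =>
    if PySem.Str.endswith data_str ("_" ++ tf) then
      [[("symbol", data_str), ("timeframe", tf), ("file", data_str),
        ("parsed_symbol", PySem.Str.slice data_str none (some (-((("_" ++ tf).length : Nat) : Int)))),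
        ("parsed_timeframe", tf)]]
    else pvLoopA data_str rest

def parse_data_string_py (data_str : String) : List (List (String × String)) :=
  pvLoopA data_str pvTfPatterns

-- ===== PORT B =====
-- hand port of data_str.rpartition('_') for the one-character separator '_'
-- (exact: returns (text before the LAST '_', '_', text after it), or ('', '', s) if no '_')
def pvRPartitionU (s : String) : String × String × String :=
  match s.toList.reverse.span (fun c => !(c == '_')) with
  | (_, []) => ("", "", s)
  | (sufRev, _ :: preRev) =>
      (String.ofList preRev.reverse, "_", String.ofList sufRev.reverse)

def pvTfSet : PySem.Set String :=
  PySem.Set.ofList ["1m", "5m", "15m", "30m", "1h", "2h", "4h", "1d", "daily"]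

def parse_data_string_py_alt (data_str : String) : List (List (String × String)) :=
  let p := pvRPartitionU data_str
  if (p.2.1 != "") && PySem.Set.contains pvTfSet p.2.2 then
    [[("symbol", data_str), ("timeframe", p.2.2), ("file", data_str),
      ("parsed_symbol", p.1), ("parsed_timeframe", p.2.2)]]
  else
    [[("symbol", data_str), ("timeframe", "1m"), ("file", data_str)]]

-- ===== PRECONDITION & SPEC =====
def Spec_parse_data_string_py (data_str : String) (out : List (List (String × String))) : Prop := out = parse_data_string_py_alt data_str
instance (data_str : String) (out : List (List (String × String))) : Decidable (Spec_parse_data_string_py data_str out) := by unfold Spec_parse_data_string_py; infer_instance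

-- ===== CLAIM (what is proved, stated in full; the proofs are below) =====
def Claim_equal_parse_data_string_py : Prop := ∀ (data_str : String), Dom_parse_data_string_py data_str → Spec_parse_data_string_py data_str (parse_data_string_py data_str)

-- ===== LEMMAS AND PROOFS =====

-- span on a list whose first '_' (from the left) is at the end of t
theorem pvSpanAt (t u : List Char) (ht : '_' ∉ t) :
    (t ++ '_' :: u).span (fun c => !(c == '_')) = (t, '_' :: u) := by
  induction t with
  | nil => simp [List.span_eq_takeWhile_dropWhile]
  | cons c t ih =>
    have hc : c ≠ '_' := fun h => ht (h ▸ List.mem_cons_self)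
    have ht' : '_' ∉ t := fun h => ht (List.mem_cons_of_mem _ h)
    have := ih ht'
    simp_all [List.span_eq_takeWhile_dropWhile]

-- endswith ('_' :: t) characterised through the takeWhile/dropWhile decomposition of the reversed string
theorem pvEndsIff (s : String) (t : List Char) (hnu : '_' ∉ t) :
    PySem.Chars.endswith s.toList ('_' :: t) = true ↔
      (s.toList.reverse.takeWhile (fun c => !(c == '_')) = t.reverse ∧
       s.toList.reverse.dropWhile (fun c => !(c == '_')) ≠ []) := by
  rw [PySem.Chars.endswith_iff]
  constructor
  · rintro ⟨w, hw⟩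
    have hr : s.toList.reverse = t.reverse ++ '_' :: w.reverse := by
      rw [← hw]; simp
    have hsp := pvSpanAt t.reverse w.reverse (by simpa using hnu)
    rw [List.span_eq_takeWhile_dropWhile] at hsp
    have h1 : (t.reverse ++ '_' :: w.reverse).takeWhile (fun c => !(c == '_')) = t.reverse := by
      simpa using congrArg Prod.fst hsp
    have h2 : (t.reverse ++ '_' :: w.reverse).dropWhile (fun c => !(c == '_')) = '_' :: w.reverse := by
      simpa using congrArg Prod.snd hsp
    rw [hr, h1, h2]
    simp
  · rintro ⟨ha, hb⟩
    obtain ⟨c, b', hb'⟩ := List.exists_cons_of_ne_nil hb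
    have hc : c = '_' := by
      have := List.dropWhile_get_zero_not (p := fun c => !(c == '_'))
        (l := s.toList.reverse) (by simp [hb'])
      simp [hb'] at this
      exact this
    have hr : s.toList.reverse = t.reverse ++ '_' :: b' := by
      conv_lhs => rw [← List.takeWhile_append_dropWhile (p := fun c => !(c == '_'))
        (l := s.toList.reverse), ha, hb', hc]
    refine ⟨b'.reverse, ?_⟩
    have := congrArg List.reverse hr
    simpa using this.symm

-- slicing off the last k characters
theorem pvSliceTake (s : String) (k : Nat) (hk : 0 < k) :
    (PySem.Str.slice s none (some (-(k : Int)))).toList = s.toList.take (s.toList.length - k) := by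
  rw [PySem.Str.toList_slice, PySem.Chars.slice_eq_listSlice, PySem.List.slice_to_neg_natCast _ _ hk]

-- in a matched branch, A's slice equals B's reversed prefix
theorem pvSliceEq (s tf : String) (b' : List Char)
    (hr : s.toList.reverse = tf.toList.reverse ++ '_' :: b') :
    PySem.Str.slice s none (some (-((("_" ++ tf).length : Nat) : Int))) = String.ofList b'.reverse := by
  apply String.toList_inj.mp
  have hcs : s.toList = (b'.reverse ++ ['_']) ++ tf.toList := by
    have := congrArg List.reverse hr
    simpa [List.append_assoc] using this
  have hone : "_".length = 1 := rfl
  rw [pvSliceTake s _ (by simp [String.length_append, hone]), String.toList_ofList, hcs]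
  simp [String.length_append]
  rw [List.take_left' (by simp [hone]; omega)]

-- ===== VERDICT (by name: the statement is the Claim_ definition above) =====
theorem parse_data_string_py_spec : Claim_equal_parse_data_string_py := by
  intro s _
  unfold Spec_parse_data_string_py
  set a := s.toList.reverse.takeWhile (fun c => !(c == '_')) with ha_def
  set b := s.toList.reverse.dropWhile (fun c => !(c == '_')) with hb_def
  have hspan : s.toList.reverse.span (fun c => !(c == '_')) = (a, b) := by
    rw [List.span_eq_takeWhile_dropWhile]
  by_cases hb : b = []
  · -- no underscore: both sides return the default dict
    have hfalse : ∀ t : List Char, '_' ∉ t →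
        PySem.Chars.endswith s.toList ('_' :: t) = false := by
      intro t hnu
      rw [Bool.eq_false_iff]
      intro h
      exact ((pvEndsIff s t hnu).mp h).2 hb
    have hB : parse_data_string_py_alt s = [[("symbol", s), ("timeframe", "1m"), ("file", s)]] := by
      unfold parse_data_string_py_alt pvRPartitionU
      rw [hspan, hb]
      simp
    rw [hB]
    unfold parse_data_string_py pvTfPatterns
    simp [pvLoopA, hfalse ['1','m'] (by decide), hfalse ['5','m'] (by decide), hfalse ['1','5','m'] (by decide), hfalse ['3','0','m'] (by decide), hfalse ['1','h'] (by decide), hfalse ['2','h'] (by decide), hfalse ['4','h'] (by decide), hfalse ['1','d'] (by decide), hfalse ['d','a','i','l','y'] (by decide)]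
  · obtain ⟨c, b', hb'⟩ := List.exists_cons_of_ne_nil hb
    have hc : c = '_' := by
      have := List.dropWhile_get_zero_not (p := fun c => !(c == '_'))
        (l := s.toList.reverse) (by rw [← hb_def, hb']; simp)
      simp [← hb_def, hb'] at this
      exact this
    subst hc
    have hr : s.toList.reverse = a ++ '_' :: b' := by
      conv_lhs => rw [← List.takeWhile_append_dropWhile (p := fun c => !(c == '_'))
        (l := s.toList.reverse), ← ha_def, ← hb_def, hb']
    have hB2 : pvRPartitionU s = (String.ofList b'.reverse, "_", String.ofList a.reverse) := by
      unfold pvRPartitionU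
      rw [hspan, hb']
    have hcond : ∀ t : List Char, '_' ∉ t →
        (PySem.Chars.endswith s.toList ('_' :: t) = true ↔ a = t.reverse) := by
      intro t hnu
      rw [pvEndsIff s t hnu, ← ha_def, ← hb_def]
      exact ⟨fun h => h.1, fun h => ⟨h, hb⟩⟩
    -- match branch helper: if a = tf.toList.reverse then B returns the 5-key dict
    have hmatch : ∀ tf : String, a = tf.toList.reverse →
        PySem.Set.contains pvTfSet tf = true →
        parse_data_string_py_alt s =
          [[("symbol", s), ("timeframe", tf), ("file", s),
            ("parsed_symbol", PySem.Str.slice s none (some (-((("_" ++ tf).length : Nat) : Int)))),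
            ("parsed_timeframe", tf)]] := by
      intro tf hat hin
      have htf : String.ofList a.reverse = tf := by
        rw [hat]; apply String.toList_inj.mp; simp
      have hrr : s.toList.reverse = tf.toList.reverse ++ '_' :: b' := by rw [← hat]; exact hr
      have hsl := pvSliceEq s tf b' hrr
      unfold parse_data_string_py_alt
      rw [hB2]
      simp only [htf]
      rw [if_pos (by simp [(PySem.Set.contains_iff _ _).mp hin]), hsl]
    have hAeq : ∀ t : List Char, '_' ∉ t → a = t.reverse →
        PySem.Chars.endswith s.toList ('_' :: t) = true := fun t hnu hat => (hcond t hnu).mpr hat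
    have hAne : ∀ t : List Char, '_' ∉ t → a ≠ t.reverse →
        PySem.Chars.endswith s.toList ('_' :: t) = false := by
      intro t hnu hat
      rw [Bool.eq_false_iff]
      exact fun h => hat ((hcond t hnu).mp h)
    by_cases h1 : a = ['m','1']
    · rw [hmatch "1m" h1 (by decide)]
      unfold parse_data_string_py pvTfPatterns
      simp [pvLoopA, hAeq ['1','m'] (by decide) h1]
    · by_cases h2 : a = ['m','5']
      · rw [hmatch "5m" h2 (by decide)]
        unfold parse_data_string_py pvTfPatterns
        simp [pvLoopA, hAne ['1','m'] (by decide) h1, hAeq ['5','m'] (by decide) h2]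
      · by_cases h3 : a = ['m','5','1']
        · rw [hmatch "15m" h3 (by decide)]
          unfold parse_data_string_py pvTfPatterns
          simp [pvLoopA, hAne ['1','m'] (by decide) h1, hAne ['5','m'] (by decide) h2, hAeq ['1','5','m'] (by decide) h3]
        · by_cases h4 : a = ['m','0','3']
          · rw [hmatch "30m" h4 (by decide)]
            unfold parse_data_string_py pvTfPatterns
            simp [pvLoopA, hAne ['1','m'] (by decide) h1, hAne ['5','m'] (by decide) h2, hAne ['1','5','m'] (by decide) h3, hAeq ['3','0','m'] (by decide) h4]
          · by_cases h5 : a = ['h','1']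
            · rw [hmatch "1h" h5 (by decide)]
              unfold parse_data_string_py pvTfPatterns
              simp [pvLoopA, hAne ['1','m'] (by decide) h1, hAne ['5','m'] (by decide) h2, hAne ['1','5','m'] (by decide) h3, hAne ['3','0','m'] (by decide) h4, hAeq ['1','h'] (by decide) h5]
            · by_cases h6 : a = ['h','2']
              · rw [hmatch "2h" h6 (by decide)]
                unfold parse_data_string_py pvTfPatterns
                simp [pvLoopA, hAne ['1','m'] (by decide) h1, hAne ['5','m'] (by decide) h2, hAne ['1','5','m'] (by decide) h3, hAne ['3','0','m'] (by decide) h4, hAne ['1','h'] (by decide) h5, hAeq ['2','h'] (by decide) h6]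
              · by_cases h7 : a = ['h','4']
                · rw [hmatch "4h" h7 (by decide)]
                  unfold parse_data_string_py pvTfPatterns
                  simp [pvLoopA, hAne ['1','m'] (by decide) h1, hAne ['5','m'] (by decide) h2, hAne ['1','5','m'] (by decide) h3, hAne ['3','0','m'] (by decide) h4, hAne ['1','h'] (by decide) h5, hAne ['2','h'] (by decide) h6, hAeq ['4','h'] (by decide) h7]
                · by_cases h8 : a = ['d','1']
                  · rw [hmatch "1d" h8 (by decide)]
                    unfold parse_data_string_py pvTfPatterns
                    simp [pvLoopA, hAne ['1','m'] (by decide) h1, hAne ['5','m'] (by decide) h2, hAne ['1','5','m'] (by decide) h3, hAne ['3','0','m'] (by decide) h4, hAne ['1','h'] (by decide) h5, hAne ['2','h'] (by decide) h6, hAne ['4','h'] (by decide) h7, hAeq ['1','d'] (by decide) h8]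
                  · by_cases h9 : a = ['y','l','i','a','d']
                    · rw [hmatch "daily" h9 (by decide)]
                      unfold parse_data_string_py pvTfPatterns
                      simp [pvLoopA, hAne ['1','m'] (by decide) h1, hAne ['5','m'] (by decide) h2, hAne ['1','5','m'] (by decide) h3, hAne ['3','0','m'] (by decide) h4, hAne ['1','h'] (by decide) h5, hAne ['2','h'] (by decide) h6, hAne ['4','h'] (by decide) h7, hAne ['1','d'] (by decide) h8, hAeq ['d','a','i','l','y'] (by decide) h9]
                    · -- no pattern matches: both sides default
                      have hnot : PySem.Set.contains pvTfSet (String.ofList a.reverse) = false := by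
                        rw [Bool.eq_false_iff]
                        intro h
                        have hm := (PySem.Set.contains_iff _ _).mp h
                        have hm' : String.ofList a.reverse ∈
                            ["1m", "5m", "15m", "30m", "1h", "2h", "4h", "1d", "daily"] := by
                          simpa [pvTfSet, PySem.Set.mem_ofList] using hm
                        have hback : ∀ tf : String, String.ofList a.reverse = tf → a = tf.toList.reverse := by
                          intro tf htf
                          have := congrArg String.toList htf
                          rw [String.toList_ofList] at this
                          rw [← this]; simp
                        simp only [List.mem_cons, List.not_mem_nil, or_false] at hm'
                        rcases hm' with h|h|h|h|h|h|h|h|h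
                        exacts [h1 (hback _ h), h2 (hback _ h), h3 (hback _ h), h4 (hback _ h),
                          h5 (hback _ h), h6 (hback _ h), h7 (hback _ h), h8 (hback _ h), h9 (hback _ h)]
                      have hB3 : parse_data_string_py_alt s = [[("symbol", s), ("timeframe", "1m"), ("file", s)]] := by
                        unfold parse_data_string_py_alt
                        rw [hB2]
                        have hnot' : String.ofList a.reverse ∉ pvTfSet := fun hm =>
                          Bool.eq_false_iff.mp hnot ((PySem.Set.contains_iff _ _).mpr hm)
                        simp [hnot']
                      rw [hB3]
                      unfold parse_data_string_py pvTfPatterns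
                      simp [pvLoopA, hAne ['1','m'] (by decide) h1, hAne ['5','m'] (by decide) h2, hAne ['1','5','m'] (by decide) h3, hAne ['3','0','m'] (by decide) h4, hAne ['1','h'] (by decide) h5, hAne ['2','h'] (by decide) h6, hAne ['4','h'] (by decide) h7, hAne ['1','d'] (by decide) h8, hAne ['d','a','i','l','y'] (by decide) h9]
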